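-- pv_equiv track=rewrite | github.com/DuncanBiwott/DSA-Learning | saf_test.py | matched_letters_count
-- ===== SOURCE A (Python) =====
-- def matched_letters_count(word: str = "aCbcABCA") -> int:
--     small = {}
--     capital = {}
--     count = 0
--
--     for x, letter in enumerate(word):
--         if letter.islower():
--             small[letter] = x
--         else:
--             if capital.get(letter):
--                 capital[letter].append(x)
--             else:
--                 capital[letter] = [x]
--
--     for item in small.items():
--         capital_indexes = capital.get(item[0].upper())
--         if capital_indexes and all(x > item[1] for x in capital_indexes):
--             count += 1
--
--     return count
-- ===== SOURCE B (Python) =====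
-- def matched_letters_count(word: str = "aCbcABCA") -> int:
--     count = 0
--     for low in "abcdefghijklmnopqrstuvwxyz":
--         up = low.upper()
--         last_low = -1
--         first_up = -1
--         for i, ch in enumerate(word):
--             if ch == low:
--                 last_low = i
--             elif ch == up and first_up < 0:
--                 first_up = i
--         if last_low >= 0 and first_up > last_low:
--             count += 1
--     return count
-- ===== Notes on version B (the rewrite author's own statement) =====
-- stated objective: alternative
-- what changed: B drops A's dictionaries entirely: instead of one indexing pass building small/capital dicts and then counting over dict items, B loops over the fixed alphabet a-z and for each letter scans the word once keeping only its last lowercase index and the first index of its uppercase, counting when first_upper > last_lower.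
import Mathlib
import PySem

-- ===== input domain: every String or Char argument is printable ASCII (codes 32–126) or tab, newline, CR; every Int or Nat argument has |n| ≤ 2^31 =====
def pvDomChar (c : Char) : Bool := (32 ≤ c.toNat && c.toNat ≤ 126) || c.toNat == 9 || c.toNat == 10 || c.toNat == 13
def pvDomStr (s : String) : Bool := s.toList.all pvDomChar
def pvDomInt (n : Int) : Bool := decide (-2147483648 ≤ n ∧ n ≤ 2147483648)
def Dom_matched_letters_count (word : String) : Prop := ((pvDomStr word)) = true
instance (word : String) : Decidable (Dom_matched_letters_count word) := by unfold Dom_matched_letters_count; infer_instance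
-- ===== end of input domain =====

-- B drops A's dictionaries: it loops over the fixed alphabet a-z and scans the word once per
-- letter, keeping only the last lowercase index and the first uppercase index (alternative
-- decomposition, same results on the stated domain).

-- ===== PORT A =====
-- first loop body of A: record last lowercase index, append index to the capital-list otherwise
def pvStepA (st : PySem.Dict Char Int × PySem.Dict Char (List Int)) (p : Int × Char) :
    PySem.Dict Char Int × PySem.Dict Char (List Int) :=
  let x := p.1
  let letter := p.2
  if PySem.Chars.islower letter then
    (st.1.insert letter x, st.2)
  else
    match st.2.get? letter with
    | some l =>
      if l.isEmpty then (st.1, st.2.insert letter [x])   -- 'if capital.get(letter):' is falsy on []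
      else (st.1, st.2.insert letter (l ++ [x]))
    | none => (st.1, st.2.insert letter [x])

-- second loop body of A: count items whose capital-index list is truthy and all beyond the last index
def pvCountA (capital : PySem.Dict Char (List Int)) (count : Int) (item : Char × Int) : Int :=
  match capital.get? (PySem.Chars.upperChar item.1) with
  | some l =>
    if !l.isEmpty && l.all (fun x => decide (item.2 < x)) then count + 1 else count
  | none => count

def matched_letters_count (word : String) : Int :=
  let st := (PySem.List.enumerate word.toList).foldl pvStepA (PySem.Dict.empty, PySem.Dict.empty)
  st.1.items.foldl (pvCountA st.2) 0

-- ===== PORT B =====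
-- the alphabet literal B iterates over
def pvAlphabet : List Char := "abcdefghijklmnopqrstuvwxyz".toList

-- inner-loop body of B: last index of `low`, first index of `up`
def pvScanB (low up : Char) (st : Int × Int) (p : Int × Char) : Int × Int :=
  if p.2 == low then (p.1, st.2)
  else if p.2 == up && decide (st.2 < 0) then (st.1, p.1)
  else st

def matched_letters_count_alt (word : String) : Int :=
  pvAlphabet.foldl (fun count low =>
    let up := PySem.Chars.upperChar low
    let st := (PySem.List.enumerate word.toList).foldl (pvScanB low up) (-1, -1)
    if decide (0 ≤ st.1) && decide (st.1 < st.2) then count + 1 else count) 0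

-- ===== PRECONDITION & SPEC =====
def Spec_matched_letters_count (word : String) (out : Int) : Prop := out = matched_letters_count_alt word
instance (word : String) (out : Int) : Decidable (Spec_matched_letters_count word out) := by unfold Spec_matched_letters_count; infer_instance

-- ===== CLAIM (what is proved, stated in full; the proofs are below) =====
def Claim_equal_matched_letters_count : Prop := ∀ (word : String), Dom_matched_letters_count word → Spec_matched_letters_count word (matched_letters_count word)

-- ===== LEMMAS AND PROOFS =====

-- last index (from start s) at which a lowercase occurrence of c sits
def pvLastL (cs : List Char) (s : Int) (c : Char) : Option Int :=
  match cs with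
  | [] => none
  | a :: t => Option.or (pvLastL t (s + 1) c) (if PySem.Chars.islower a && a == c then some s else none)

-- last index of c, no case condition
def pvLastAll (cs : List Char) (s : Int) (c : Char) : Option Int :=
  match cs with
  | [] => none
  | a :: t => Option.or (pvLastAll t (s + 1) c) (if a == c then some s else none)

-- all indices of non-lowercase occurrences of c, in order
def pvIdxs (cs : List Char) (s : Int) (c : Char) : List Int :=
  match cs with
  | [] => []
  | a :: t => (if !PySem.Chars.islower a && a == c then [s] else []) ++ pvIdxs t (s + 1) c

-- first index of c
def pvFirst (cs : List Char) (s : Int) (c : Char) : Option Int :=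
  match cs with
  | [] => none
  | a :: t => if a == c then some s else pvFirst t (s + 1) c

-- the common per-letter predicate both programs compute
def pvP (cs : List Char) (c : Char) : Bool :=
  match pvLastL cs 0 c with
  | some j =>
    match (pvIdxs cs 0 (PySem.Chars.upperChar c)).head? with
    | some m => decide (j < m)
    | none => false
  | none => false

lemma pvLastL_ge (cs : List Char) (s : Int) (c : Char) (j : Int) (h : pvLastL cs s c = some j) :
    s ≤ j := by
  induction cs generalizing s j with
  | nil => simp [pvLastL] at h
  | cons a t ih =>
    simp only [pvLastL] at h
    cases ht : pvLastL t (s + 1) c with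
    | some j' =>
      rw [ht, Option.some_or] at h
      have := ih (s + 1) j' ht
      injection h with h'; omega
    | none =>
      rw [ht, Option.none_or] at h
      split at h
      · injection h with h'; omega
      · simp at h

lemma pvIdxs_ge (cs : List Char) (s : Int) (c : Char) : ∀ x ∈ pvIdxs cs s c, s ≤ x := by
  induction cs generalizing s with
  | nil => simp [pvIdxs]
  | cons a t ih =>
    intro x hx
    simp only [pvIdxs, List.mem_append] at hx
    rcases hx with hx | hx
    · split at hx
      · simp at hx; omega
      · simp at hx
    · have := ih (s + 1) x hx; omega

lemma pvIdxs_head_min (cs : List Char) (s : Int) (c : Char) (m : Int)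
    (h : (pvIdxs cs s c).head? = some m) : ∀ x ∈ pvIdxs cs s c, m ≤ x := by
  induction cs generalizing s with
  | nil => simp [pvIdxs] at h
  | cons a t ih =>
    by_cases hcond : (!PySem.Chars.islower a && a == c) = true
    · simp only [pvIdxs, hcond, if_pos, List.cons_append, List.nil_append, List.head?_cons] at h ⊢
      injection h with h'
      intro x hx
      simp only [List.mem_cons] at hx
      rcases hx with rfl | hx
      · omega
      · have := pvIdxs_ge t (s + 1) c x hx; omega
    · have hcond' : (!PySem.Chars.islower a && a == c) = false := by simpa using hcond
      simp only [pvIdxs, hcond', Bool.false_eq_true, if_neg, not_false_iff, List.nil_append] at h ⊢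
      exact ih (s + 1) h

lemma pvLastAll_eq_pvLastL (cs : List Char) (s : Int) (c : Char)
    (hc : PySem.Chars.islower c = true) : pvLastAll cs s c = pvLastL cs s c := by
  induction cs generalizing s with
  | nil => rfl
  | cons a t ih =>
    simp only [pvLastAll, pvLastL, ih (s + 1)]
    by_cases hac : a = c
    · subst hac; simp [hc]
    · simp [beq_eq_false_iff_ne.mpr hac]

lemma pvFirst_eq_head_pvIdxs (cs : List Char) (s : Int) (c : Char)
    (hc : PySem.Chars.islower c = false) : pvFirst cs s c = (pvIdxs cs s c).head? := by
  induction cs generalizing s with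
  | nil => rfl
  | cons a t ih =>
    simp only [pvFirst, pvIdxs]
    by_cases hac : a = c
    · subst hac; simp [hc]
    · simp [beq_eq_false_iff_ne.mpr hac, ih (s + 1)]

-- characterization of A's first loop
lemma pvAFold (cs : List Char) (s : Int) (sm : PySem.Dict Char Int) (ca : PySem.Dict Char (List Int))
    (hca : ∀ c l, ca.get? c = some l → l ≠ []) (hnd : sm.keys.Nodup) :
    (∀ c, ((PySem.List.enumerate cs s).foldl pvStepA (sm, ca)).1.get? c
        = Option.or (pvLastL cs s c) (sm.get? c)) ∧
    (∀ c, ((PySem.List.enumerate cs s).foldl pvStepA (sm, ca)).2.get? c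
        = if pvIdxs cs s c = [] then ca.get? c else some (ca.getD c [] ++ pvIdxs cs s c)) ∧
    ((PySem.List.enumerate cs s).foldl pvStepA (sm, ca)).1.keys.Nodup ∧
    (∀ k ∈ ((PySem.List.enumerate cs s).foldl pvStepA (sm, ca)).1.keys,
        PySem.Chars.islower k = true ∨ k ∈ sm.keys) := by
  induction cs generalizing s sm ca with
  | nil =>
    refine ⟨fun c => ?_, fun c => ?_, hnd, fun k hk => Or.inr hk⟩
    · simp [PySem.List.enumerate_nil, pvLastL]
    · simp [PySem.List.enumerate_nil, pvIdxs]
  | cons a t ih =>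
    rw [PySem.List.enumerate_cons]
    simp only [List.foldl_cons]
    by_cases ha : PySem.Chars.islower a
    · -- lowercase head: record index in small
      have hstep : pvStepA (sm, ca) (s, a) = (sm.insert a s, ca) := by simp [pvStepA, ha]
      rw [hstep]
      obtain ⟨ih1, ih2, ih3, ih4⟩ :=
        ih (s + 1) (sm.insert a s) ca hca (PySem.Dict.nodup_keys_insert _ _ _ hnd)
      refine ⟨fun c => ?_, fun c => ?_, ih3, fun k hk => ?_⟩
      · rw [ih1 c, PySem.Dict.get?_insert]
        simp only [pvLastL, ha, Bool.true_and]
        by_cases hac : c = a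
        · subst hac
          simp [Option.or_assoc]
        · simp [beq_eq_false_iff_ne.mpr (fun h => hac h.symm), hac]
      · rw [ih2 c]
        simp [pvIdxs, ha]
      · rcases ih4 k hk with h | h
        · exact Or.inl h
        · rcases (PySem.Dict.mem_keys_insert _ _ _ _).mp h with rfl | h
          · exact Or.inl ha
          · exact Or.inr h
    · -- non-lowercase head: append index to the capital-list
      have ha' : PySem.Chars.islower a = false := by simpa using ha
      have hstep : pvStepA (sm, ca) (s, a) = (sm, ca.insert a (ca.getD a [] ++ [s])) := by
        simp only [pvStepA, ha', Bool.false_eq_true, if_neg, not_false_iff]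
        cases hget : ca.get? a with
        | none => rw [PySem.Dict.getD_of_get?_eq_none _ _ hget]; rfl
        | some l =>
          have hl : l ≠ [] := hca a l hget
          have : l.isEmpty = false := by simpa using hl
          rw [PySem.Dict.getD_of_get?_eq_some _ _ hget]
          simp [this]
      rw [hstep]
      have hca' : ∀ c l, (ca.insert a (ca.getD a [] ++ [s])).get? c = some l → l ≠ [] := by
        intro c l h
        rw [PySem.Dict.get?_insert] at h
        split at h
        · injection h with h'; subst h'; simp
        · exact hca c l h
      obtain ⟨ih1, ih2, ih3, ih4⟩ := ih (s + 1) sm _ hca' hnd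
      refine ⟨fun c => ?_, fun c => ?_, ih3, ih4⟩
      · rw [ih1 c]
        simp [pvLastL, ha']
      · rw [ih2 c]
        simp only [pvIdxs, ha', Bool.not_false, Bool.true_and]
        by_cases hac : a = c
        · subst hac
          simp only [beq_self_eq_true, if_pos, List.cons_append, List.nil_append]
          rw [PySem.Dict.get?_insert, PySem.Dict.getD_insert]
          simp only [if_pos rfl]
          cases hrest : pvIdxs t (s + 1) a with
          | nil => simp
          | cons y r => simp
        · have hac' : (a == c) = false := beq_eq_false_iff_ne.mpr hac
          have hca2 : ¬ c = a := fun h => hac h.symm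
          rw [PySem.Dict.get?_insert, PySem.Dict.getD_insert]
          simp [hac', hca2]

-- characterization of B's inner scan
lemma pvBFold (low up : Char) (hlu : low ≠ up) (cs : List Char) (s l0 f0 : Int) (hs : 0 ≤ s) :
    (PySem.List.enumerate cs s).foldl (pvScanB low up) (l0, f0) =
      ((match pvLastAll cs s low with | some j => j | none => l0),
       (if f0 < 0 then match pvFirst cs s up with | some m => m | none => f0 else f0)) := by
  induction cs generalizing s l0 f0 with
  | nil =>
    simp [PySem.List.enumerate_nil, pvLastAll, pvFirst]
  | cons a t ih =>
    rw [PySem.List.enumerate_cons]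
    simp only [List.foldl_cons]
    by_cases hal : a = low
    · subst hal
      have h1 : pvScanB a up (l0, f0) (s, a) = (s, f0) := by simp [pvScanB]
      have h2 : (a == up) = false := beq_eq_false_iff_ne.mpr hlu
      rw [h1, ih (s + 1) s f0 (by omega)]
      simp only [pvLastAll, pvFirst, beq_self_eq_true, if_pos, h2, Bool.false_eq_true, if_neg,
        not_false_iff]
      cases pvLastAll t (s + 1) a <;> simp [Option.some_or, Option.none_or]
    · have hal' : (a == low) = false := beq_eq_false_iff_ne.mpr hal
      by_cases hau : a = up
      · subst hau
        by_cases hf : f0 < 0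
        · have h1 : pvScanB low a (l0, f0) (s, a) = (l0, s) := by
            simp [pvScanB, hal', hf]
          rw [h1, ih (s + 1) l0 s (by omega)]
          simp only [pvLastAll, pvFirst, hal', Bool.false_eq_true, if_neg, not_false_iff,
            beq_self_eq_true, if_pos, Option.or_none, hf]
          have : ¬ s < 0 := by omega
          simp [this]
        · have h1 : pvScanB low a (l0, f0) (s, a) = (l0, f0) := by
            simp [pvScanB, hal', hf]
          rw [h1, ih (s + 1) l0 f0 (by omega)]
          simp [pvLastAll, pvFirst, hal', hf]
      · have hau' : (a == up) = false := beq_eq_false_iff_ne.mpr hau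
        have h1 : pvScanB low up (l0, f0) (s, a) = (l0, f0) := by
          simp [pvScanB, hal', hau']
        rw [h1, ih (s + 1) l0 f0 (by omega)]
        simp [pvLastAll, pvFirst, hal', hau']

-- A's counting loop is a countP
def pvACond (capital : PySem.Dict Char (List Int)) (item : Char × Int) : Bool :=
  match capital.get? (PySem.Chars.upperChar item.1) with
  | some l => !l.isEmpty && l.all (fun x => decide (item.2 < x))
  | none => false

lemma pvCountA_countP (capital : PySem.Dict Char (List Int)) (its : List (Char × Int)) (acc : Int) :
    its.foldl (pvCountA capital) acc = acc + (its.countP (pvACond capital) : Int) := by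
  induction its generalizing acc with
  | nil => simp
  | cons i t ih =>
    rw [List.foldl_cons, List.countP_cons]
    have hstep : pvCountA capital acc i = acc + (if pvACond capital i then 1 else 0) := by
      unfold pvCountA pvACond
      cases capital.get? (PySem.Chars.upperChar i.1) with
      | none => simp
      | some l =>
        by_cases hp : (!l.isEmpty && l.all (fun x => decide (i.2 < x))) = true <;> simp [hp]
    rw [hstep, ih]
    by_cases hp : pvACond capital i <;> simp [hp] <;> ring

-- a conditional-increment foldl over a list where the condition agrees with p on members
lemma pvFoldl_count_of_congr {α : Type} (q p : α → Bool) (l : List α) (acc : Int)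
    (h : ∀ x ∈ l, q x = p x) :
    l.foldl (fun a x => if q x then a + 1 else a) acc = acc + (l.countP p : Int) := by
  induction l generalizing acc with
  | nil => simp
  | cons x t ih =>
    rw [List.foldl_cons, List.countP_cons]
    have hx : q x = p x := h x (List.mem_cons_self)
    rw [ih _ (fun y hy => h y (List.mem_cons_of_mem _ hy))]
    by_cases hp : p x <;> simp [hx, hp] <;> ring

-- facts about the 26 alphabet letters
lemma pvAlphaFacts : pvAlphabet.all (fun c => PySem.Chars.islower c
    && !(c == PySem.Chars.upperChar c)
    && !PySem.Chars.islower (PySem.Chars.upperChar c)) = true := by decide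

lemma pvAlphaNodup : pvAlphabet.Nodup := by decide

lemma pvMemAlpha (c : Char) (h : PySem.Chars.islower c = true) : c ∈ pvAlphabet := by
  simp only [PySem.Chars.islower, Bool.and_eq_true, decide_eq_true_eq] at h
  have h1 : 97 ≤ c.toNat := h.1
  have h2 : c.toNat ≤ 122 := h.2
  have hc : Char.ofNat c.toNat = c := Char.ofNat_toNat c
  rw [← hc]
  interval_cases h3 : c.toNat <;> decide

-- B's per-letter condition equals pvP on alphabet letters
lemma pvB_letter (cs : List Char) (low : Char) (hlow : PySem.Chars.islower low = true)
    (hne : low ≠ PySem.Chars.upperChar low)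
    (hup : PySem.Chars.islower (PySem.Chars.upperChar low) = false) :
    (let st := (PySem.List.enumerate cs 0).foldl (pvScanB low (PySem.Chars.upperChar low)) (-1, -1)
     (decide (0 ≤ st.1) && decide (st.1 < st.2))) = pvP cs low := by
  rw [pvBFold low (PySem.Chars.upperChar low) hne cs 0 (-1) (-1) (by omega)]
  rw [pvLastAll_eq_pvLastL cs 0 low hlow,
      pvFirst_eq_head_pvIdxs cs 0 (PySem.Chars.upperChar low) hup]
  simp only [pvP]
  cases hL : pvLastL cs 0 low with
  | none => simp
  | some j =>
    have hj : 0 ≤ j := pvLastL_ge cs 0 low j hL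
    cases hH : (pvIdxs cs 0 (PySem.Chars.upperChar low)).head? with
    | none =>
      have : ¬ (j < -1) := by omega
      simp [hj, this]
    | some m => simp [hj]

-- A's whole program equals countP pvP over the alphabet
lemma pvA_eq_countP (cs : List Char) :
    (let st := (PySem.List.enumerate cs).foldl pvStepA (PySem.Dict.empty, PySem.Dict.empty)
     st.1.items.foldl (pvCountA st.2) 0) = (pvAlphabet.countP (pvP cs) : Int) := by
  obtain ⟨h1, h2, h3, h4⟩ := pvAFold cs 0 PySem.Dict.empty PySem.Dict.empty
    (by intro c l h; simp [PySem.Dict.get?_empty] at h) (by simp [PySem.Dict.keys_empty])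
  simp only []
  set st := (PySem.List.enumerate cs).foldl pvStepA (PySem.Dict.empty, PySem.Dict.empty) with hst
  have hsm : ∀ c, st.1.get? c = pvLastL cs 0 c := by
    intro c; rw [h1 c]; simp [PySem.Dict.get?_empty]
  have hcap : ∀ c, st.2.get? c
      = if pvIdxs cs 0 c = [] then none else some (pvIdxs cs 0 c) := by
    intro c; rw [h2 c]
    simp [PySem.Dict.get?_empty, PySem.Dict.getD_empty]
  -- every key of small is in the alphabet
  have hkeysub : ∀ k ∈ st.1.keys, k ∈ pvAlphabet := by
    intro k hk
    rcases h4 k hk with h | h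
    · exact pvMemAlpha k h
    · simp [PySem.Dict.keys_empty] at h
  -- the counting loop
  rw [pvCountA_countP st.2 st.1.items 0]
  rw [PySem.Dict.items_eq_map_keys st.1 h3 0, List.countP_map]
  -- on keys, the composed condition is pvP cs
  have hcong : st.1.keys.countP ((pvACond st.2) ∘ (fun k => (k, st.1.getD k 0)))
      = st.1.keys.countP (pvP cs) := by
    apply List.countP_congr
    intro k hk
    have hks : st.1.get? k ≠ none := by
      rw [Ne, PySem.Dict.get?_eq_none_iff_not_mem_keys]
      simp [hk]
    have heq : pvACond st.2 (k, st.1.getD k 0) = pvP cs k := by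
      cases hL : st.1.get? k with
      | none => exact absurd hL hks
      | some j =>
        have hgd : st.1.getD k 0 = j := PySem.Dict.getD_of_get?_eq_some _ _ hL
        rw [hsm k] at hL
        simp only [pvACond, pvP, hgd, hcap, hL]
        cases hI : pvIdxs cs 0 (PySem.Chars.upperChar k) with
        | nil => simp
        | cons y r =>
          have hmin := pvIdxs_head_min cs 0 (PySem.Chars.upperChar k) y (by rw [hI]; rfl)
          rw [hI] at hmin
          simp only [if_neg (by simp : ¬ (y :: r : List Int) = []), List.head?_cons,
            List.isEmpty_cons, Bool.not_false, Bool.true_and]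
          by_cases hj : j < y
          · simp only [hj, decide_true, List.all_eq_true, decide_eq_true_eq]
            intro x hx
            have := hmin x hx
            omega
          · simp only [hj, decide_false]
            apply List.all_eq_false.mpr
            exact ⟨y, by simp, by simpa using hj⟩
    simp only [Function.comp, heq]
  rw [hcong]
  -- extend the count from keys to the whole alphabet
  have hperm : (st.1.keys.filter (pvP cs)).Perm (pvAlphabet.filter (pvP cs)) := by
    rw [List.perm_ext_iff_of_nodup (List.Nodup.filter _ h3) (List.Nodup.filter _ pvAlphaNodup)]
    intro c
    simp only [List.mem_filter]
    constructor
    · rintro ⟨hc, hp⟩; exact ⟨hkeysub c hc, hp⟩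
    · rintro ⟨_, hp⟩
      refine ⟨?_, hp⟩
      have : pvLastL cs 0 c ≠ none := by
        intro h; simp [pvP, h] at hp
      rw [← hsm c, Ne, PySem.Dict.get?_eq_none_iff_not_mem_keys] at this
      simpa using this
  rw [List.countP_eq_length_filter, List.countP_eq_length_filter, hperm.length_eq]
  omega

-- ===== VERDICT (by name: the statement is the Claim_ definition above) =====
theorem matched_letters_count_spec : Claim_equal_matched_letters_count := by
  intro word _
  unfold Spec_matched_letters_count matched_letters_count matched_letters_count_alt
  rw [pvA_eq_countP word.toList]
  have hfold : pvAlphabet.foldl (fun count low =>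
      let up := PySem.Chars.upperChar low
      let st := (PySem.List.enumerate word.toList).foldl (pvScanB low up) (-1, -1)
      if decide (0 ≤ st.1) && decide (st.1 < st.2) then count + 1 else count) 0
      = 0 + (pvAlphabet.countP (pvP word.toList) : Int) := by
    apply pvFoldl_count_of_congr
    intro low hlow
    have hfacts := List.all_eq_true.mp pvAlphaFacts low hlow
    simp only [Bool.and_eq_true, Bool.not_eq_true', beq_eq_false_iff_ne] at hfacts
    exact pvB_letter word.toList low hfacts.1.1 hfacts.1.2 hfacts.2
  rw [hfold]
  omega
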